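-- pv_equiv track=rewrite | github.com/thiessen2003/mammography-agent | agents/image_analyzer.py | _identify_urgent_flags
-- ===== SOURCE A (Python) =====
-- from typing import Dict, Any, Optional, List
--
-- def _identify_urgent_flags(analysis: str) -> List[str]:
--     """Identify any urgent or concerning flags in the analysis."""
--     urgent_keywords = [
--         'urgent', 'immediate', 'suspicious', 'concerning', 'worrisome',
--         'malignant', 'cancer', 'metastasis', 'invasive'
--     ]
--
--     urgent_flags = []
--     analysis_lower = analysis.lower()
--
--     for keyword in urgent_keywords:
--         if keyword in analysis_lower:
--             # Find the context around the urgent keyword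
--             sentences = analysis.split('.')
--             for sentence in sentences:
--                 if keyword in sentence.lower():
--                     urgent_flags.append(sentence.strip())
--                     break
--
--     return urgent_flags
-- ===== SOURCE B (Python) =====
-- from typing import List
--
-- def _identify_urgent_flags(analysis: str) -> List[str]:
--     """Identify any urgent or concerning flags in the analysis."""
--     urgent_keywords = [
--         'urgent', 'immediate', 'suspicious', 'concerning', 'worrisome',
--         'malignant', 'cancer', 'metastasis', 'invasive'
--     ]
--
--     # One pass over the sentences: record the first sentence that contains
--     # each keyword; then emit in keyword order.
--     first_hit = {}
--     for sentence in analysis.split('.'):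
--         low = sentence.lower()
--         for keyword in urgent_keywords:
--             if keyword not in first_hit and keyword in low:
--                 first_hit[keyword] = sentence.strip()
--
--     return [first_hit[keyword] for keyword in urgent_keywords if keyword in first_hit]
-- ===== Notes on version B (the rewrite author's own statement) =====
-- stated objective: alternative
-- what changed: Inverted the loop nest: instead of re-splitting the text and rescanning the sentence list once per keyword, B splits once and makes a single pass over the sentences building a dict from each keyword to the first sentence containing it, then emits the recorded sentences in keyword order.
import Mathlib
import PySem

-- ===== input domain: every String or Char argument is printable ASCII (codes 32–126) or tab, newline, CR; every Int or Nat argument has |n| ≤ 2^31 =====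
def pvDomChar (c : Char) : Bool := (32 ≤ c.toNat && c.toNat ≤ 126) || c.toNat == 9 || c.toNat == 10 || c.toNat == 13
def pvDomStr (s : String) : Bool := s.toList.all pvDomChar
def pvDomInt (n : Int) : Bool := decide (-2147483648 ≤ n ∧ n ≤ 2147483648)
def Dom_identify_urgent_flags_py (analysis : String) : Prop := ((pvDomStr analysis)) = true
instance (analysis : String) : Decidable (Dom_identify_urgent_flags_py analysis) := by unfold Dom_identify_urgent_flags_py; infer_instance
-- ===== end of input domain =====

-- ===== PORT A =====
-- B restructures A (split once + one indexing pass over the sentences instead of a rescan per keyword); equal return values proved.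

-- the keyword list, shared data of both programs
def pvKeywords : List (List Char) :=
  ["urgent".toList, "immediate".toList, "suspicious".toList, "concerning".toList,
   "worrisome".toList, "malignant".toList, "cancer".toList, "metastasis".toList,
   "invasive".toList]

-- Port of A: per keyword, guard on the lowered whole text, then re-split and scan for the first matching sentence (the for/break is List.find?).
def identify_urgent_flags_py (analysis : String) : List String :=
  let analysis_lower := PySem.Chars.lower analysis.toList
  pvKeywords.foldl (fun urgent_flags keyword =>
    if PySem.Chars.isIn keyword analysis_lower then
      let sentences := PySem.Chars.splitOn analysis.toList ['.']
      match sentences.find? (fun sentence => PySem.Chars.isIn keyword (PySem.Chars.lower sentence)) with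
      | some sentence => urgent_flags ++ [String.ofList (PySem.Chars.strip sentence)]
      | none => urgent_flags
    else urgent_flags) []

-- ===== PORT B =====
-- one step of B's inner keyword loop: record the stripped sentence for a not-yet-seen keyword it contains
def pvRecordKw (low v : List Char) (d : PySem.Dict (List Char) (List Char)) (kw : List Char) :
    PySem.Dict (List Char) (List Char) :=
  if !d.contains kw && PySem.Chars.isIn kw low then d.insert kw v else d

def identify_urgent_flags_py_alt (analysis : String) : List String :=
  let first_hit :=
    (PySem.Chars.splitOn analysis.toList ['.']).foldl
      (fun d sentence =>
        pvKeywords.foldl (pvRecordKw (PySem.Chars.lower sentence) (PySem.Chars.strip sentence)) d)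
      PySem.Dict.empty
  pvKeywords.foldl (fun out keyword =>
    match first_hit.get? keyword with
    | some v => out ++ [String.ofList v]
    | none => out) []

-- ===== PRECONDITION & SPEC =====
def Spec_identify_urgent_flags_py (analysis : String) (out : List String) : Prop := out = identify_urgent_flags_py_alt analysis
instance (analysis : String) (out : List String) : Decidable (Spec_identify_urgent_flags_py analysis out) := by unfold Spec_identify_urgent_flags_py; infer_instance

-- ===== CLAIM (what is proved, stated in full; the proofs are below) =====
def Claim_equal_identify_urgent_flags_py : Prop := ∀ (analysis : String), Dom_identify_urgent_flags_py analysis → Spec_identify_urgent_flags_py analysis (identify_urgent_flags_py analysis)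

-- ===== LEMMAS AND PROOFS =====

theorem splitOn_go_infix (sep s : List Char) :
    ∀ (fuel : Nat) (l cur : List Char) (acc : List (List Char)),
      (∀ p ∈ acc, p <:+: s) → (cur.reverse ++ l) <:+: s →
      ∀ p ∈ PySem.Chars.splitOn.go sep fuel l cur acc, p <:+: s := by
  intro fuel
  induction fuel with
  | zero =>
    intro l cur acc hacc hcur p hp
    simp [PySem.Chars.splitOn.go] at hp
    rcases hp with hp | hp
    · exact hacc p hp
    · exact hp ▸ hcur
  | succ fuel ih =>
    intro l cur acc hacc hcur p hp
    cases l with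
    | nil =>
      simp [PySem.Chars.splitOn.go] at hp
      rcases hp with hp | hp
      · exact hacc p hp
      · subst hp; exact List.IsInfix.trans ⟨[], [], by simp⟩ hcur
    | cons c rest =>
      rw [PySem.Chars.splitOn.go] at hp
      by_cases hpre : sep.isPrefixOf (c :: rest) = true
      · rw [if_pos hpre] at hp
        refine ih _ [] (cur.reverse :: acc) ?_ ?_ p hp
        · intro q hq
          rcases List.mem_cons.mp hq with hq | hq
          · exact hq ▸ List.IsInfix.trans ⟨[], c :: rest, by simp⟩ hcur
          · exact hacc q hq
        · have hl : (c :: rest) <:+: s := List.IsInfix.trans ⟨cur.reverse, [], by simp⟩ hcur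
          exact List.IsInfix.trans (by simpa using ((c :: rest).drop_suffix sep.length).isInfix) hl
      · rw [if_neg hpre] at hp
        refine ih rest (c :: cur) acc hacc ?_ p hp
        simpa using hcur

theorem mem_splitOn_infix (s p : List Char) (h : p ∈ PySem.Chars.splitOn s ['.']) : p <:+: s := by
  refine splitOn_go_infix ['.'] s (s.length + 1) s [] [] (by simp) (by simp) p ?_
  simpa [PySem.Chars.splitOn] using h

-- if some sentence contains the keyword, the whole lowered text does
theorem isIn_lower_of_find?_some (analysis kw p : List Char)
    (h : (PySem.Chars.splitOn analysis ['.']).find?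
          (fun sentence => PySem.Chars.isIn kw (PySem.Chars.lower sentence)) = some p) :
    PySem.Chars.isIn kw (PySem.Chars.lower analysis) = true := by
  have hmem := List.mem_of_find?_eq_some h
  have hp : PySem.Chars.isIn kw (PySem.Chars.lower p) = true := by
    simpa using List.find?_some h
  have h1 : kw <:+: PySem.Chars.lower p := (PySem.Chars.isIn_iff_infix kw _).mp hp
  have h2 : PySem.Chars.lower p <:+: PySem.Chars.lower analysis := by
    simpa [PySem.Chars.lower] using (mem_splitOn_infix analysis p hmem).map PySem.Chars.lowerChar
  exact (PySem.Chars.isIn_iff_infix kw _).mpr (h1.trans h2)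

theorem get?_recordFold_not_mem (low v : List Char) :
    ∀ (ks : List (List Char)) (d : PySem.Dict (List Char) (List Char)) (kw : List Char),
      kw ∉ ks → (ks.foldl (pvRecordKw low v) d).get? kw = d.get? kw := by
  intro ks
  induction ks with
  | nil => intro d kw _; rfl
  | cons k ks ih =>
    intro d kw hkw
    have hne : k ≠ kw := fun h => hkw (h ▸ List.mem_cons_self ..)
    have : (pvRecordKw low v d k).get? kw = d.get? kw := by
      unfold pvRecordKw
      split
      · exact PySem.Dict.get?_insert_of_ne _ _ (Ne.symm hne)
      · rfl
    simpa [this] using ih (pvRecordKw low v d k) kw (fun h => hkw (List.mem_cons_of_mem _ h))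

theorem get?_recordFold_mem (low v : List Char) :
    ∀ (ks : List (List Char)) (d : PySem.Dict (List Char) (List Char)) (kw : List Char),
      ks.Nodup → kw ∈ ks →
      (ks.foldl (pvRecordKw low v) d).get? kw =
        if d.contains kw = false ∧ PySem.Chars.isIn kw low = true then some v else d.get? kw := by
  intro ks
  induction ks with
  | nil => intro d kw _ h; cases h
  | cons k ks ih =>
    intro d kw hnd hkw
    rcases List.mem_cons.mp hkw with heq | hmem
    · subst heq
      have hnotin : kw ∉ ks := (List.nodup_cons.mp hnd).1
      rw [List.foldl_cons, get?_recordFold_not_mem low v ks _ kw hnotin]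
      unfold pvRecordKw
      split
      · rename_i hcond
        simp only [Bool.and_eq_true, Bool.not_eq_true'] at hcond
        rw [if_pos ⟨hcond.1, hcond.2⟩]
        exact PySem.Dict.get?_insert_self _ _ _
      · rename_i hcond
        simp only [Bool.and_eq_true, Bool.not_eq_true', not_and] at hcond
        by_cases hc : d.contains kw = false
        · rw [if_neg (by intro h; exact absurd h.2 (by simpa [hc] using hcond))]
        · rw [if_neg (fun h => hc h.1)]
    · have hne : k ≠ kw := fun h => (List.nodup_cons.mp hnd).1 (h ▸ hmem)
      rw [List.foldl_cons, ih _ kw (List.nodup_cons.mp hnd).2 hmem]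
      have hg : (pvRecordKw low v d k).get? kw = d.get? kw := by
        unfold pvRecordKw
        split
        · exact PySem.Dict.get?_insert_of_ne _ _ (Ne.symm hne)
        · rfl
      have hc : (pvRecordKw low v d k).contains kw = d.contains kw := by
        rw [PySem.Dict.contains_eq_isSome_get?, PySem.Dict.contains_eq_isSome_get?, hg]
      rw [hg, hc]

theorem get?_outerFold (kw : List Char) (hkw : kw ∈ pvKeywords) :
    ∀ (sentences : List (List Char)) (d : PySem.Dict (List Char) (List Char)),
      ((sentences.foldl
          (fun d sentence =>
            pvKeywords.foldl (pvRecordKw (PySem.Chars.lower sentence) (PySem.Chars.strip sentence)) d)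
          d).get? kw) =
        if d.contains kw then d.get? kw
        else (sentences.find? (fun sentence => PySem.Chars.isIn kw (PySem.Chars.lower sentence))).map
              PySem.Chars.strip := by
  have hnd : pvKeywords.Nodup := by decide
  intro sentences
  induction sentences with
  | nil =>
    intro d
    by_cases hc : d.contains kw
    · simp [hc]
    · have hn : d.get? kw = none := by
        rw [PySem.Dict.get?_eq_none_iff_contains]; simpa using hc
      simp [hc, hn]
  | cons s ss ih =>
    intro d
    rw [List.foldl_cons, ih]
    have hstep := get?_recordFold_mem (PySem.Chars.lower s) (PySem.Chars.strip s) pvKeywords d kw hnd hkw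
    set d' := pvKeywords.foldl (pvRecordKw (PySem.Chars.lower s) (PySem.Chars.strip s)) d with hd'
    by_cases hc : d.contains kw
    · have hg : d'.get? kw = d.get? kw := by rw [hstep]; simp [hc]
      have hcc : d'.contains kw = true := by
        rw [PySem.Dict.contains_eq_isSome_get?, hg, ← PySem.Dict.contains_eq_isSome_get?]; exact hc
      simp [hcc, hg, hc]
    · have hcf : d.contains kw = false := by simpa using hc
      have hgn : d.get? kw = none := by
        rw [PySem.Dict.get?_eq_none_iff_contains]; simp [hcf]
      by_cases hin : PySem.Chars.isIn kw (PySem.Chars.lower s) = true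
      · have hg : d'.get? kw = some (PySem.Chars.strip s) := by rw [hstep]; simp [hcf, hin]
        have hcc : d'.contains kw = true := by
          rw [PySem.Dict.contains_eq_isSome_get?, hg]; rfl
        simp [hcc, hg, hcf, hin]
      · have hg : d'.get? kw = none := by rw [hstep]; simp [hcf, hin, hgn]
        have hcc : d'.contains kw = false := by
          rw [PySem.Dict.contains_eq_isSome_get?, hg]; rfl
        have hinf : PySem.Chars.isIn kw (PySem.Chars.lower s) = false := by simpa using hin
        simp [hcc, hcf, hinf]

-- ===== VERDICT (by name: the statement is the Claim_ definition above) =====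
theorem identify_urgent_flags_py_spec : Claim_equal_identify_urgent_flags_py := by
  intro analysis _
  unfold Spec_identify_urgent_flags_py identify_urgent_flags_py identify_urgent_flags_py_alt
  refine PySem.List.foldl_congr_mem pvKeywords _ _ [] (fun out keyword hkw => ?_)
  have hdict : ((PySem.Chars.splitOn analysis.toList ['.']).foldl
      (fun d sentence =>
        pvKeywords.foldl (pvRecordKw (PySem.Chars.lower sentence) (PySem.Chars.strip sentence)) d)
      PySem.Dict.empty).get? keyword
      = ((PySem.Chars.splitOn analysis.toList ['.']).find?
          (fun sentence => PySem.Chars.isIn keyword (PySem.Chars.lower sentence))).map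
          PySem.Chars.strip := by
    rw [get?_outerFold keyword hkw _ PySem.Dict.empty]
    rw [if_neg (by rw [PySem.Dict.contains_empty]; exact Bool.false_ne_true)]
  rw [hdict]
  cases hfind : (PySem.Chars.splitOn analysis.toList ['.']).find?
      (fun sentence => PySem.Chars.isIn keyword (PySem.Chars.lower sentence)) with
  | none =>
    by_cases hg : PySem.Chars.isIn keyword (PySem.Chars.lower analysis.toList) = true
    · simp [hg, hfind]
    · simp only [Bool.not_eq_true] at hg
      simp [hg]
  | some p =>
    have hg := isIn_lower_of_find?_some analysis.toList keyword p hfind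
    simp [hg, hfind]
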